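-- pv_equiv track=rewrite | github.com/gaoyang23nj/CEBD | Main/Scenario_Benchamark/DTNNodeBuffer_Detect_SDBG.py | __get_NRS_NRNS
-- ===== SOURCE A (Python) =====
-- def __get_NRS_NRNS(ERW):
--     N_RS = 0
--     N_RNS = 0
--     # 记录有多少pkt在ERW里面没有被 传送出去
--     tmpPktRList = []
--     tmpPktRidList = []
--     tmpPktSList = []
--     tmpPktSidList = []
--     for tmpER in ERW:
--         (j_node_id, k_node_id, j_ER_sn, k_ER_sn, timestamp, SL_j, RL_j) = tmpER
--         # 接收到的
--         for tmpRece in RL_j: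
--             (pkt_id, src_id, dst_id) = tmpRece
--             # 记录报文接收到了
--             tmpPktRList.append((pkt_id, src_id, dst_id, timestamp, k_node_id))
--             # tmpPktRidList.append(pkt_id)
--         for tmpSend in SL_j:
--             (pkt_id, src_id, dst_id) = tmpSend
--             # 记录报文发送出去
--             tmpPktSList.append((pkt_id, src_id, dst_id, timestamp, k_node_id))
--             # tmpPktSidList.append(pkt_id)
--     N_RS = len(tmpPktRList)
--     tmp = 0
--     if len(tmpPktRList)!=0 and len(tmpPktSList)!=0:
--         pass
--     # 从所有接收的报文中 去除 已经发送出去的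
--     for pkt_R in tmpPktRList:
--         (pkt_id, src_id, dst_id, timestamp, k_node_id) = pkt_R
--         for pkt_S in tmpPktSList:
--             (pkt_ids, src_ids, dst_ids, timestamps, k_node_ids) = pkt_S
--             if ((pkt_id == pkt_ids) and  (timestamps>=timestamp)):
--                 tmp = tmp + 1
--                 break
--     N_RNS = N_RS- tmp
--     return N_RS, N_RNS
-- ===== SOURCE B (Python) =====
-- def __get_NRS_NRNS(ERW):
--     # One pass: collect (pkt_id, receive timestamp) pairs and a dict pkt_id -> max send timestamp,
--     # then one O(1) lookup per received packet.
--     max_send = {}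
--     received = []
--     for (j_node_id, k_node_id, j_ER_sn, k_ER_sn, timestamp, SL_j, RL_j) in ERW:
--         for (pkt_id, src_id, dst_id) in RL_j:
--             received.append((pkt_id, timestamp))
--         for (pkt_id, src_id, dst_id) in SL_j:
--             if pkt_id not in max_send or max_send[pkt_id] < timestamp:
--                 max_send[pkt_id] = timestamp
--     n_rs = len(received)
--     tmp = 0
--     for (pkt_id, ts) in received:
--         if pkt_id in max_send and max_send[pkt_id] >= ts:
--             tmp += 1
--     return n_rs, n_rs - tmp
-- ===== Notes on version B (the rewrite author's own statement) =====
-- stated objective: faster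
-- what changed: Replaces the nested scan of all sent packets per received packet with a single pass building a dict pkt_id -> max send timestamp, then an O(1) lookup per received packet.
import Mathlib
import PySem

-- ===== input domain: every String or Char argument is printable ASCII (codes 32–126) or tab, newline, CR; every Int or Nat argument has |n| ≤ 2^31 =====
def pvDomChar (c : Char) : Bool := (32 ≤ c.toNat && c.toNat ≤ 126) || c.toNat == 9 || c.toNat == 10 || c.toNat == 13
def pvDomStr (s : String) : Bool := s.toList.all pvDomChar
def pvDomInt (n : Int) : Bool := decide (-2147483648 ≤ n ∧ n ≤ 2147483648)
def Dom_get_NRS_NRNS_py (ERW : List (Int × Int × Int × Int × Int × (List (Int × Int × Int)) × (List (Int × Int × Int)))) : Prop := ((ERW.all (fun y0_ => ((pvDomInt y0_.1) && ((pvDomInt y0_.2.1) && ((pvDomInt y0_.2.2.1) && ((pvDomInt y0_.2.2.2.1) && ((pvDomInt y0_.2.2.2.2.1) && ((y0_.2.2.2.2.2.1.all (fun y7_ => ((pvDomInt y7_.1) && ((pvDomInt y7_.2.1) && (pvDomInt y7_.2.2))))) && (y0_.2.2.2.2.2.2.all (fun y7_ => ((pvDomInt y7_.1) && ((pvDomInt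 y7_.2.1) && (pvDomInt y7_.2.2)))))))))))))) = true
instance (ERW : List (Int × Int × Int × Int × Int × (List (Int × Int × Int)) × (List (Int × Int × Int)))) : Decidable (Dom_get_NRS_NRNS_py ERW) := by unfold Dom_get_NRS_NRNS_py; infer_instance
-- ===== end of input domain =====

-- ===== PORT A =====
-- B replaces A's nested scan of all sent packets per received packet with a dict
-- pkt_id -> max send timestamp built in one pass (asymptotically faster in a timing run).

-- inner loop of A over tmpPktSList with its break: returns true iff a matching resend is found
def pvHasSendA (pkt_id ts : Int) : List (Int × Int × Int × Int × Int) → Bool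
  | [] => false
  | (pkt_ids, _, _, timestamps, _) :: rest =>
      if pkt_id == pkt_ids && ts ≤ timestamps then true else pvHasSendA pkt_id ts rest

-- one iteration of A's outer 'for tmpER in ERW' loop (appends to tmpPktRList, tmpPktSList)
def pvStepA (st : List (Int × Int × Int × Int × Int) × List (Int × Int × Int × Int × Int))
    (tmpER : Int × Int × Int × Int × Int × (List (Int × Int × Int)) × (List (Int × Int × Int))) :
    List (Int × Int × Int × Int × Int) × List (Int × Int × Int × Int × Int) :=
  let (_, k_node_id, _, _, timestamp, SL_j, RL_j) := tmpER
  let r := RL_j.foldl (fun l p => l ++ [(p.1, p.2.1, p.2.2, timestamp, k_node_id)]) st.1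
  let s := SL_j.foldl (fun l p => l ++ [(p.1, p.2.1, p.2.2, timestamp, k_node_id)]) st.2
  (r, s)

def get_NRS_NRNS_py (ERW : List (Int × Int × Int × Int × Int × (List (Int × Int × Int)) × (List (Int × Int × Int)))) : Int × Int :=
  let st := ERW.foldl pvStepA ([], [])
  let N_RS : Int := PySem.List.len st.1
  let tmp : Int := st.1.foldl (fun t p => if pvHasSendA p.1 p.2.2.2.1 st.2 then t + 1 else t) 0
  (N_RS, N_RS - tmp)

-- ===== PORT B =====
-- 'pkt_id in max_send and max_send[pkt_id] >= ts'
def pvCheckB (d : PySem.Dict Int Int) (pkt_id ts : Int) : Bool :=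
  match d.get? pkt_id with
  | some m => ts ≤ m
  | none => false

-- one iteration of B's outer loop (appends (pkt_id, timestamp); keeps max send timestamp per pkt_id)
def pvStepB (st : PySem.Dict Int Int × List (Int × Int))
    (tmpER : Int × Int × Int × Int × Int × (List (Int × Int × Int)) × (List (Int × Int × Int))) :
    PySem.Dict Int Int × List (Int × Int) :=
  let (_, _, _, _, timestamp, SL_j, RL_j) := tmpER
  let recv := RL_j.foldl (fun l p => l ++ [(p.1, timestamp)]) st.2
  let ms := SL_j.foldl (fun d p =>
      match d.get? p.1 with
      | none => d.insert p.1 timestamp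
      | some m => if m < timestamp then d.insert p.1 timestamp else d) st.1
  (ms, recv)

def get_NRS_NRNS_py_alt (ERW : List (Int × Int × Int × Int × Int × (List (Int × Int × Int)) × (List (Int × Int × Int)))) : Int × Int :=
  let st := ERW.foldl pvStepB (PySem.Dict.mk [], [])
  let n_rs : Int := PySem.List.len st.2
  let tmp : Int := st.2.foldl (fun t p => if pvCheckB st.1 p.1 p.2 then t + 1 else t) 0
  (n_rs, n_rs - tmp)
-- ===== PRECONDITION & SPEC =====
def Spec_get_NRS_NRNS_py (ERW : List (Int × Int × Int × Int × Int × (List (Int × Int × Int)) × (List (Int × Int × Int)))) (out : Int × Int) : Prop := out = get_NRS_NRNS_py_alt ERW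
instance (ERW : List (Int × Int × Int × Int × Int × (List (Int × Int × Int)) × (List (Int × Int × Int)))) (out : Int × Int) : Decidable (Spec_get_NRS_NRNS_py ERW out) := by unfold Spec_get_NRS_NRNS_py; infer_instance

-- ===== CLAIM (what is proved, stated in full; the proofs are below) =====
def Claim_equal_get_NRS_NRNS_py : Prop := ∀ (ERW : List (Int × Int × Int × Int × Int × (List (Int × Int × Int)) × (List (Int × Int × Int)))), Dom_get_NRS_NRNS_py ERW → Spec_get_NRS_NRNS_py ERW (get_NRS_NRNS_py ERW)


-- ===== LEMMAS AND PROOFS =====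

def pvProj (p : Int × Int × Int × Int × Int) : Int × Int := (p.1, p.2.2.2.1)

theorem pvHasSendA_eq_any (pkt_id ts : Int) (s : List (Int × Int × Int × Int × Int)) :
    pvHasSendA pkt_id ts s = s.any (fun q => pkt_id == q.1 && ts ≤ q.2.2.2.1) := by
  induction s with
  | nil => rfl
  | cons q rest ih =>
    obtain ⟨a, b, c, d, e⟩ := q
    simp only [pvHasSendA, List.any_cons, ← ih]
    cases hc : (pkt_id == a && decide (ts ≤ d)) <;> simp_all

theorem pvCheckB_step (d : PySem.Dict Int Int) (kS tsE pkt_id ts : Int) :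
    pvCheckB (match d.get? kS with
      | none => d.insert kS tsE
      | some m => if m < tsE then d.insert kS tsE else d) pkt_id ts
    = (pvCheckB d pkt_id ts || (pkt_id == kS && ts ≤ tsE)) := by
  unfold pvCheckB
  by_cases hk : pkt_id = kS
  · subst hk
    cases hg : d.get? pkt_id with
    | none => simp [PySem.Dict.get?_insert_self]
    | some m =>
      simp only [beq_self_eq_true, Bool.true_and]
      split_ifs with hlt <;> simp only [PySem.Dict.get?_insert_self, hg]
      · by_cases h : ts ≤ m <;> by_cases h2 : ts ≤ tsE <;>
          simp [h, h2] <;> omega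
      · by_cases h : ts ≤ m <;> by_cases h2 : ts ≤ tsE <;>
          simp [h, h2] <;> omega
  · have hne : (pkt_id == kS) = false := by simp [hk]
    cases hg : d.get? kS with
    | none => simp [PySem.Dict.get?_insert_of_ne _ _ hk, hne]
    | some m =>
      simp only [hne, Bool.false_and, Bool.or_false]
      split_ifs with hlt
      · simp [PySem.Dict.get?_insert_of_ne _ _ hk]
      · rfl

theorem pvCheckB_fold (SL : List (Int × Int × Int)) (tsE : Int) (d : PySem.Dict Int Int)
    (pkt_id ts : Int) :
    pvCheckB (SL.foldl (fun d p =>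
      match d.get? p.1 with
      | none => d.insert p.1 tsE
      | some m => if m < tsE then d.insert p.1 tsE else d) d) pkt_id ts
    = (pvCheckB d pkt_id ts || SL.any (fun p => pkt_id == p.1 && ts ≤ tsE)) := by
  induction SL generalizing d with
  | nil => simp
  | cons p rest ih =>
    simp only [List.foldl_cons, List.any_cons, ih, pvCheckB_step]
    cases pvCheckB d pkt_id ts <;> cases (pkt_id == p.1 && decide (ts ≤ tsE)) <;> simp

theorem pvFold_inv (ERW : List (Int × Int × Int × Int × Int × (List (Int × Int × Int)) × (List (Int × Int × Int))))
    (r s : List (Int × Int × Int × Int × Int)) (ms : PySem.Dict Int Int) (recv : List (Int × Int))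
    (h1 : recv = r.map pvProj)
    (h2 : ∀ pkt_id ts, pvCheckB ms pkt_id ts = pvHasSendA pkt_id ts s) :
    (ERW.foldl pvStepB (ms, recv)).2 = ((ERW.foldl pvStepA (r, s)).1).map pvProj ∧
    (∀ pkt_id ts, pvCheckB (ERW.foldl pvStepB (ms, recv)).1 pkt_id ts
        = pvHasSendA pkt_id ts (ERW.foldl pvStepA (r, s)).2) := by
  induction ERW generalizing r s ms recv with
  | nil => exact ⟨h1, h2⟩
  | cons e rest ih =>
    obtain ⟨j, k, jsn, ksn, tsE, SL, RL⟩ := e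
    simp only [List.foldl_cons]
    apply ih
    · simp only [PySem.List.foldl_append_singleton_eq_map, h1, List.map_append,
        List.map_map]
      rfl
    · intro pkt_id ts
      simp only [PySem.List.foldl_append_singleton_eq_map,
        pvCheckB_fold, h2, pvHasSendA_eq_any, List.any_append, List.any_map]
      rfl

-- ===== VERDICT (by name: the statement is the Claim_ definition above) =====
theorem get_NRS_NRNS_py_spec : Claim_equal_get_NRS_NRNS_py := by
  intro ERW _
  unfold Spec_get_NRS_NRNS_py get_NRS_NRNS_py get_NRS_NRNS_py_alt
  obtain ⟨h1, h2⟩ := pvFold_inv ERW [] [] (PySem.Dict.mk []) [] rfl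
    (by intro pkt_id ts; rfl)
  simp only [h1, PySem.List.len_eq, List.length_map, List.foldl_map]
  have htmp : ∀ (s : List (Int × Int × Int × Int × Int)) (ms : PySem.Dict Int Int),
      (∀ pkt_id ts, pvCheckB ms pkt_id ts = pvHasSendA pkt_id ts s) →
      ∀ r : List (Int × Int × Int × Int × Int),
      r.foldl (fun t p => if pvCheckB ms (pvProj p).1 (pvProj p).2 then t + 1 else t) (0 : Int)
        = r.foldl (fun t p => if pvHasSendA p.1 p.2.2.2.1 s then t + 1 else t) 0 := by
    intro s ms h r
    apply PySem.List.foldl_congr_mem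
    intro acc p _
    simp [h, pvProj]
  rw [htmp _ _ h2]
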